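-- pv_equiv track=rewrite | github.com/blerandaisufi/Rrjeta-2017 | UdpServeri/UdbServeri/UdpServeri.py | zanoret
-- ===== SOURCE A (Python) =====
-- def zanoret(mesazhi):
--      zanoret="aeëiouyAEËIOUY"
--      iterator=0
--      mesazhi=' '.join(mesazhi.split()[1:])
--      for char in mesazhi:
--        if char in zanoret:
--            iterator+=1
--      return iterator
-- ===== SOURCE B (Python) =====
-- def zanoret(mesazhi):
--     vowels = set("aeëiouyAEËIOUY")
--     words = mesazhi.split()
--     if not words:
--         return 0
--     total = sum(1 for c in mesazhi if c in vowels)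
--     first = sum(1 for c in words[0] if c in vowels)
--     return total - first
-- ===== Notes on version B (the rewrite author's own statement) =====
-- stated objective: alternative
-- what changed: Instead of rebuilding the string without its first word and counting vowels in it, B counts vowels in the whole string and subtracts the vowel count of the first word (returning 0 when there are no words).
import Mathlib
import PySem

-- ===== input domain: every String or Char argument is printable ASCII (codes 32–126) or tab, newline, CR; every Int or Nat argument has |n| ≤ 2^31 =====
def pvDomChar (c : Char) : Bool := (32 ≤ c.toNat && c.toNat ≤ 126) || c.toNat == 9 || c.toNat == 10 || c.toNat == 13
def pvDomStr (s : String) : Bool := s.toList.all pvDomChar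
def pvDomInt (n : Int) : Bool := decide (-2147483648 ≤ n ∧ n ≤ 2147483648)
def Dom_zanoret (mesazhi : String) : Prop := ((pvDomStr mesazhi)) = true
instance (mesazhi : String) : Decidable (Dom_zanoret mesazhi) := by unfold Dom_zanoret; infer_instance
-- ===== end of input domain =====

-- B counts vowels over the whole string and subtracts the first word's vowels (alternative decomposition; A strips the first word and counts the rest).


-- ===== PORT A =====
-- literal transliteration: rebuild the message without its first word, then loop counting vowels
def zanoret (mesazhi : String) : Int :=
  let zan : List Char := "aeëiouyAEËIOUY".toList
  let mesazhi' := PySem.Str.join " " (PySem.List.slice (PySem.Str.split₀ mesazhi) (some 1) none)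
  mesazhi'.toList.foldl (fun iterator char => if char ∈ zan then iterator + 1 else iterator) 0

-- ===== PORT B =====
def vowCountB (l : List Char) : Int :=
  (l.countP (fun c => c ∈ "aeëiouyAEËIOUY".toList) : Int)

def zanoret_alt (mesazhi : String) : Int :=
  match PySem.Str.split₀ mesazhi with
  | [] => 0
  | w :: _ => vowCountB mesazhi.toList - vowCountB w.toList

-- ===== PRECONDITION & SPEC =====
def Spec_zanoret (mesazhi : String) (out : Int) : Prop := out = zanoret_alt mesazhi
instance (mesazhi : String) (out : Int) : Decidable (Spec_zanoret mesazhi out) := by unfold Spec_zanoret; infer_instance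

-- ===== CLAIM (what is proved, stated in full; the proofs are below) =====
def Claim_equal_zanoret : Prop := ∀ (mesazhi : String), Dom_zanoret mesazhi → Spec_zanoret mesazhi (zanoret mesazhi)

-- ===== LEMMAS AND PROOFS =====

-- the vowel predicate
def isVow (c : Char) : Bool := decide (c ∈ "aeëiouyAEËIOUY".toList)

lemma vowList_eq : "aeëiouyAEËIOUY".toList = ['a','e','ë','i','o','u','y','A','E','Ë','I','O','U','Y'] := by decide

lemma isVow_space : ∀ c, PySem.Chars.isspace c = true → isVow c = false := by
  intro c h
  by_contra hv
  simp only [Bool.not_eq_false, isVow, vowList_eq, decide_eq_true_eq, List.mem_cons,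
    List.not_mem_nil, or_false] at hv
  rcases hv with rfl|rfl|rfl|rfl|rfl|rfl|rfl|rfl|rfl|rfl|rfl|rfl|rfl|rfl <;>
    simp [PySem.Chars.isspace] at h

lemma foldl_count (l : List Char) (acc : Int) :
    l.foldl (fun it c => if c ∈ "aeëiouyAEËIOUY".toList then it + 1 else it) acc
      = acc + (l.countP isVow : Int) := by
  induction l generalizing acc with
  | nil => simp
  | cons c rest ih =>
    rw [List.foldl_cons, ih, List.countP_cons]
    simp only [isVow]
    by_cases h : c ∈ "aeëiouyAEËIOUY".toList
    · rw [if_pos h, if_pos (decide_eq_true h)]; push_cast; ring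
    · rw [if_neg h, if_neg (by simpa using h)]; push_cast; ring

-- sum of vowel counts over a list of words
def sumV (ws : List (List Char)) : Nat := (ws.map (List.countP isVow)).sum

lemma sumV_reverse (ws : List (List Char)) : sumV ws.reverse = sumV ws := by
  simp [sumV, List.sum_reverse]

lemma go_inv (s cur : List Char) (acc : List (List Char)) :
    sumV (PySem.Chars.split₀.go s cur acc)
      = sumV acc + cur.countP isVow + s.countP isVow := by
  induction s generalizing cur acc with
  | nil =>
    simp only [PySem.Chars.split₀.go]
    by_cases h : cur.isEmpty
    · simp_all [sumV_reverse, List.isEmpty_iff]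
    · rw [if_neg h, sumV_reverse]
      simp [sumV, List.countP_reverse]
      ring
  | cons c rest ih =>
    by_cases hs : PySem.Chars.isspace c
    · have hv : isVow c = false := isVow_space c hs
      by_cases he : cur.isEmpty
      · rw [show PySem.Chars.split₀.go (c :: rest) cur acc
              = PySem.Chars.split₀.go rest [] acc by simp [PySem.Chars.split₀.go, hs, he], ih]
        simp_all [List.isEmpty_iff]
      · rw [show PySem.Chars.split₀.go (c :: rest) cur acc
              = PySem.Chars.split₀.go rest [] (cur.reverse :: acc) by
            simp [PySem.Chars.split₀.go, hs, he], ih]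
        simp [sumV, hv, List.countP_reverse]
        ring
    · rw [show PySem.Chars.split₀.go (c :: rest) cur acc
            = PySem.Chars.split₀.go rest (c :: cur) acc by simp [PySem.Chars.split₀.go, hs], ih]
      simp [List.countP_cons]
      ring

lemma split₀_count (s : List Char) : sumV (PySem.Chars.split₀ s) = s.countP isVow := by
  have := go_inv s [] []
  simpa [PySem.Chars.split₀, sumV] using this

lemma join_count (parts : List (List Char)) :
    (PySem.Chars.join [' '] parts).countP isVow = sumV parts := by
  induction parts with
  | nil => simp [PySem.Chars.join_nil, sumV]
  | cons p rest ih =>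
    cases rest with
    | nil => simp [PySem.Chars.join_singleton, sumV]
    | cons q t =>
      rw [PySem.Chars.join_cons_cons]
      simp only [List.countP_append, ih, sumV, List.map_cons, List.sum_cons]
      have : ([' '] : List Char).countP isVow = 0 := by decide
      omega

-- ===== VERDICT (by name: the statement is the Claim_ definition above) =====
theorem zanoret_spec : Claim_equal_zanoret := by
  intro mesazhi _
  unfold Spec_zanoret zanoret zanoret_alt
  rw [foldl_count]
  have hslice : PySem.List.slice (PySem.Str.split₀ mesazhi) (some 1) none
      = (PySem.Str.split₀ mesazhi).drop 1 := by
    simpa using PySem.List.slice_from (PySem.Str.split₀ mesazhi) (a := 1) (by norm_num)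
  rw [hslice]
  have hmap := PySem.Str.split₀_map_toList mesazhi
  cases hW : PySem.Str.split₀ mesazhi with
  | nil =>
    have hc : PySem.Chars.split₀ mesazhi.toList = [] := by rw [← hmap, hW]; rfl
    have hcnt : mesazhi.toList.countP isVow = 0 := by
      rw [← split₀_count, hc]; rfl
    simp [PySem.Str.toList_join, PySem.Chars.join_nil]
  | cons w rest =>
    have hc : PySem.Chars.split₀ mesazhi.toList = w.toList :: rest.map String.toList := by
      rw [← hmap, hW]; rfl
    have hcnt : mesazhi.toList.countP isVow
        = w.toList.countP isVow + sumV (rest.map String.toList) := by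
      rw [← split₀_count, hc]; simp [sumV]
    have hjoin : (PySem.Str.join " " rest).toList.countP isVow = sumV (rest.map String.toList) := by
      rw [PySem.Str.toList_join]
      exact join_count (rest.map String.toList)
    simp only [List.drop_one, List.tail_cons, vowCountB]
    rw [show (fun c => decide (c ∈ "aeëiouyAEËIOUY".toList)) = isVow from rfl, hjoin, hcnt]
    push_cast
    ring
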